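-- pv_equiv track=rewrite | github.com/shadayguerrero/pipeline_metagenomico | pipeline_modular_completo/combinar_kraken_3bases_a_biom_v4.py | extract_taxonomy_from_lineage
-- ===== SOURCE A (Python) =====
-- def extract_taxonomy_from_lineage(lineage_with_ranks):
--     """
--     Extraer taxonomía de 7 niveles del linaje con ranks
--
--     Maneja tanto GTDB como PlusPFP/EuPathDB
--     """
--     taxonomy = {
--         'Kingdom': '',
--         'Phylum': '',
--         'Class': '',
--         'Order': '',
--         'Family': '',
--         'Genus': '',
--         'Species': ''
--     }
--
--     for name, rank in lineage_with_ranks: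
--         # Detectar Reino/Dominio
--         if rank in ['R1', 'D', 'K'] or name in ['Bacteria', 'Archaea', 'Eukaryota', 'Viruses']:
--             if name in ['Bacteria', 'Archaea', 'Eukaryota', 'Viruses']:
--                 taxonomy['Kingdom'] = name
--             elif rank == 'R2' and name == 'Eukaryota':
--                 taxonomy['Kingdom'] = 'Eukaryota'
--             elif rank == 'K':
--                 # En PlusPFP, K puede ser un sub-reino como Viridiplantae
--                 # Pero el Reino principal ya debería estar en R2
--                 if not taxonomy['Kingdom']:
--                     taxonomy['Kingdom'] = name
--
--         # Phylum
--         if rank == 'P' and not taxonomy['Phylum']: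
--             taxonomy['Phylum'] = name
--
--         # Class
--         if rank == 'C' and not taxonomy['Class']:
--             taxonomy['Class'] = name
--
--         # Order
--         if rank == 'O' and not taxonomy['Order']:
--             taxonomy['Order'] = name
--
--         # Family
--         if rank == 'F' and not taxonomy['Family']:
--             taxonomy['Family'] = name
--
--         # Genus
--         if rank == 'G' and not taxonomy['Genus']:
--             taxonomy['Genus'] = name
--
--         # Species
--         if rank == 'S' and not taxonomy['Species']:
--             taxonomy['Species'] = name
--
--     # Si no se detectó Reino, intentar inferir del linaje
--     if not taxonomy['Kingdom']:
--         lineage_str = ' -> '.join([name for name, _ in lineage_with_ranks])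
--         if 'Archaea' in lineage_str:
--             taxonomy['Kingdom'] = 'Archaea'
--         elif 'Bacteria' in lineage_str:
--             taxonomy['Kingdom'] = 'Bacteria'
--         elif 'Eukaryota' in lineage_str or 'Viridiplantae' in lineage_str or 'Metazoa' in lineage_str:
--             taxonomy['Kingdom'] = 'Eukaryota'
--         elif 'Virus' in lineage_str or 'Viruses' in lineage_str:
--             taxonomy['Kingdom'] = 'Viruses'
--
--     return taxonomy
-- ===== SOURCE B (Python) =====
-- def extract_taxonomy_from_lineage(lineage_with_ranks):
--     """Seven independent find-first scans (one per rank code), a reversed scan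
--     for the last named domain, and a table-driven substring fallback."""
--     def first(code):
--         return next((n for n, r in lineage_with_ranks if r == code and n), '')
--
--     kingdom = next((n for n, _ in reversed(lineage_with_ranks)
--                     if n in ('Bacteria', 'Archaea', 'Eukaryota', 'Viruses')), '') \
--         or first('K')
--     if not kingdom:
--         joined = ' -> '.join(n for n, _ in lineage_with_ranks)
--         for probe, king in (('Archaea', 'Archaea'), ('Bacteria', 'Bacteria'),
--                             ('Eukaryota', 'Eukaryota'), ('Viridiplantae', 'Eukaryota'),
--                             ('Metazoa', 'Eukaryota'), ('Virus', 'Viruses')):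
--             if probe in joined:
--                 kingdom = king
--                 break
--     return {'Kingdom': kingdom, 'Phylum': first('P'), 'Class': first('C'),
--             'Order': first('O'), 'Family': first('F'), 'Genus': first('G'),
--             'Species': first('S')}
-- ===== Notes on version B (the rewrite author's own statement) =====
-- stated objective: alternative
-- what changed: B replaces A's single stateful pass that mutates a pre-initialized 7-key dict with seven independent find-first scans (one per rank code, skipping empty names), a reversed-order scan taking the last of the four named domains, and a table-driven loop for the substring fallback.
import Mathlib
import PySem

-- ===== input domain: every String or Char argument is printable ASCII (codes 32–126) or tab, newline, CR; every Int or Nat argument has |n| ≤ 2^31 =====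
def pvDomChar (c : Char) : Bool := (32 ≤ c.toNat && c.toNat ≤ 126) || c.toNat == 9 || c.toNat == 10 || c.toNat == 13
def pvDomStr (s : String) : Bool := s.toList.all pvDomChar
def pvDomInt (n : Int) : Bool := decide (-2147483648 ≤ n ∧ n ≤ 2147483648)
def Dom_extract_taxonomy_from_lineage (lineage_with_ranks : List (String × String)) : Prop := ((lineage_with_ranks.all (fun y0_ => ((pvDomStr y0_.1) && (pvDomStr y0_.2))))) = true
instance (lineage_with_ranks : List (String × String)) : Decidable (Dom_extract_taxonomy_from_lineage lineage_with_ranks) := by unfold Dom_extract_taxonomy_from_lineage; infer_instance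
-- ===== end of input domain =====

-- B replaces A's single stateful pass over a pre-initialized dict with seven independent
-- find-first scans, a reversed scan for the last named domain, and a table-driven fallback.

-- ===== PORT A =====
-- the Kingdom block of A's loop body
def pvKing (taxonomy : PySem.Dict String String) (name rank : String) : PySem.Dict String String :=
  if (rank = "R1" ∨ rank = "D" ∨ rank = "K") ∨
     (name = "Bacteria" ∨ name = "Archaea" ∨ name = "Eukaryota" ∨ name = "Viruses") then
    if name = "Bacteria" ∨ name = "Archaea" ∨ name = "Eukaryota" ∨ name = "Viruses" then
      taxonomy.insert "Kingdom" name
    else if rank = "R2" ∧ name = "Eukaryota" then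
      taxonomy.insert "Kingdom" "Eukaryota"
    else if rank = "K" then
      if taxonomy.getD "Kingdom" "" = "" then taxonomy.insert "Kingdom" name else taxonomy
    else taxonomy
  else taxonomy
-- one "if rank == rl and not taxonomy[key]: taxonomy[key] = name" statement of A's loop body
def pvFill (taxonomy : PySem.Dict String String) (name rank rl key : String) : PySem.Dict String String :=
  if rank = rl ∧ taxonomy.getD key "" = "" then taxonomy.insert key name else taxonomy
-- A's loop body, statement by statement
def pvStepA (taxonomy : PySem.Dict String String) (nr : String × String) : PySem.Dict String String :=
  let name := nr.1
  let rank := nr.2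
  let taxonomy := pvKing taxonomy name rank
  let taxonomy := pvFill taxonomy name rank "P" "Phylum"
  let taxonomy := pvFill taxonomy name rank "C" "Class"
  let taxonomy := pvFill taxonomy name rank "O" "Order"
  let taxonomy := pvFill taxonomy name rank "F" "Family"
  let taxonomy := pvFill taxonomy name rank "G" "Genus"
  let taxonomy := pvFill taxonomy name rank "S" "Species"
  taxonomy

def extract_taxonomy_from_lineage (lineage_with_ranks : List (String × String)) : List (String × String) :=
  let taxonomy : PySem.Dict String String :=
    PySem.Dict.ofList [("Kingdom", ""), ("Phylum", ""), ("Class", ""), ("Order", ""),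
                       ("Family", ""), ("Genus", ""), ("Species", "")]
  let taxonomy := lineage_with_ranks.foldl pvStepA taxonomy
  let taxonomy :=
    if taxonomy.getD "Kingdom" "" = "" then
      let lineage_str := PySem.Str.join " -> " (lineage_with_ranks.map (·.1))
      if PySem.Str.isIn "Archaea" lineage_str then taxonomy.insert "Kingdom" "Archaea"
      else if PySem.Str.isIn "Bacteria" lineage_str then taxonomy.insert "Kingdom" "Bacteria"
      else if PySem.Str.isIn "Eukaryota" lineage_str || PySem.Str.isIn "Viridiplantae" lineage_str
              || PySem.Str.isIn "Metazoa" lineage_str then taxonomy.insert "Kingdom" "Eukaryota"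
      else if PySem.Str.isIn "Virus" lineage_str || PySem.Str.isIn "Viruses" lineage_str then
        taxonomy.insert "Kingdom" "Viruses"
      else taxonomy
    else taxonomy
  taxonomy.items

-- ===== PORT B =====
-- B's first(code): first row with this rank code and a non-empty name
def pvFirst (l : List (String × String)) (code : String) : String :=
  match l with
  | [] => ""
  | (n, r) :: t => if r = code ∧ n ≠ "" then n else pvFirst t code
-- B's next(...) over the reversed list: first named domain found
def pvFindNamed : List (String × String) → String
  | [] => ""
  | (n, _) :: t =>
      if n = "Bacteria" ∨ n = "Archaea" ∨ n = "Eukaryota" ∨ n = "Viruses" then n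
      else pvFindNamed t
-- B's for-loop over the (probe, king) table with break
def pvFallback (joined : String) : List (String × String) → String
  | [] => ""
  | (probe, king) :: rest => if PySem.Str.isIn probe joined then king else pvFallback joined rest

def extract_taxonomy_from_lineage_alt (lineage_with_ranks : List (String × String)) : List (String × String) :=
  let ln := pvFindNamed lineage_with_ranks.reverse
  let kingdom := if ln ≠ "" then ln else pvFirst lineage_with_ranks "K"   -- Python `or`
  let kingdom :=
    if kingdom = "" then
      let joined := PySem.Str.join " -> " (lineage_with_ranks.map (·.1))
      pvFallback joined
        [("Archaea", "Archaea"), ("Bacteria", "Bacteria"), ("Eukaryota", "Eukaryota"),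
         ("Viridiplantae", "Eukaryota"), ("Metazoa", "Eukaryota"), ("Virus", "Viruses")]
    else kingdom
  [("Kingdom", kingdom), ("Phylum", pvFirst lineage_with_ranks "P"),
   ("Class", pvFirst lineage_with_ranks "C"), ("Order", pvFirst lineage_with_ranks "O"),
   ("Family", pvFirst lineage_with_ranks "F"), ("Genus", pvFirst lineage_with_ranks "G"),
   ("Species", pvFirst lineage_with_ranks "S")]

-- ===== PRECONDITION & SPEC =====
def Spec_extract_taxonomy_from_lineage (lineage_with_ranks : List (String × String)) (out : List (String × String)) : Prop := out = extract_taxonomy_from_lineage_alt lineage_with_ranks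
instance (lineage_with_ranks : List (String × String)) (out : List (String × String)) : Decidable (Spec_extract_taxonomy_from_lineage lineage_with_ranks out) := by unfold Spec_extract_taxonomy_from_lineage; infer_instance

-- ===== CLAIM (what is proved, stated in full; the proofs are below) =====
def Claim_equal_extract_taxonomy_from_lineage : Prop := ∀ (lineage_with_ranks : List (String × String)), Dom_extract_taxonomy_from_lineage lineage_with_ranks → Spec_extract_taxonomy_from_lineage lineage_with_ranks (extract_taxonomy_from_lineage lineage_with_ranks)

-- ===== LEMMAS AND PROOFS =====

-- A's taxonomy dict always has exactly these seven keys in this order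
def mk7 (k p c o f g s : String) : PySem.Dict String String :=
  PySem.Dict.mk [("Kingdom", k), ("Phylum", p), ("Class", c), ("Order", o),
                 ("Family", f), ("Genus", g), ("Species", s)]
-- left-to-right characterization of "last named domain in the list"
def pvLN : List (String × String) → String
  | [] => ""
  | (n, _) :: t =>
      if pvLN t ≠ "" then pvLN t
      else if n = "Bacteria" ∨ n = "Archaea" ∨ n = "Eukaryota" ∨ n = "Viruses" then n else ""

theorem getD_mk7_Kingdom (k p c o f g s : String) : (mk7 k p c o f g s).getD "Kingdom" "" = k := rfl
theorem getD_mk7_Phylum (k p c o f g s : String) : (mk7 k p c o f g s).getD "Phylum" "" = p := rfl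
theorem getD_mk7_Class (k p c o f g s : String) : (mk7 k p c o f g s).getD "Class" "" = c := rfl
theorem getD_mk7_Order (k p c o f g s : String) : (mk7 k p c o f g s).getD "Order" "" = o := rfl
theorem getD_mk7_Family (k p c o f g s : String) : (mk7 k p c o f g s).getD "Family" "" = f := rfl
theorem getD_mk7_Genus (k p c o f g s : String) : (mk7 k p c o f g s).getD "Genus" "" = g := rfl
theorem getD_mk7_Species (k p c o f g s : String) : (mk7 k p c o f g s).getD "Species" "" = s := rfl
theorem insert_mk7_Kingdom (k p c o f g s v : String) :
    (mk7 k p c o f g s).insert "Kingdom" v = mk7 v p c o f g s := rfl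
theorem items_mk7 (k p c o f g s : String) :
    (mk7 k p c o f g s).items = [("Kingdom", k), ("Phylum", p), ("Class", c), ("Order", o),
                                 ("Family", f), ("Genus", g), ("Species", s)] := rfl

theorem pvKing_mk7 (k p c o f g s name rank : String) :
    pvKing (mk7 k p c o f g s) name rank =
      mk7 (if (rank = "R1" ∨ rank = "D" ∨ rank = "K") ∨
              (name = "Bacteria" ∨ name = "Archaea" ∨ name = "Eukaryota" ∨ name = "Viruses") then
             if name = "Bacteria" ∨ name = "Archaea" ∨ name = "Eukaryota" ∨ name = "Viruses" then name
             else if rank = "R2" ∧ name = "Eukaryota" then "Eukaryota"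
             else if rank = "K" then (if k = "" then name else k)
             else k
           else k) p c o f g s := by
  simp only [pvKing, getD_mk7_Kingdom]
  split_ifs <;> rfl

theorem pvFill_mk7_P (k p c o f g s name rank : String) :
    pvFill (mk7 k p c o f g s) name rank "P" "Phylum" =
      mk7 k (if rank = "P" ∧ p = "" then name else p) c o f g s := by
  simp only [pvFill, getD_mk7_Phylum]; split_ifs <;> rfl
theorem pvFill_mk7_C (k p c o f g s name rank : String) :
    pvFill (mk7 k p c o f g s) name rank "C" "Class" =
      mk7 k p (if rank = "C" ∧ c = "" then name else c) o f g s := by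
  simp only [pvFill, getD_mk7_Class]; split_ifs <;> rfl
theorem pvFill_mk7_O (k p c o f g s name rank : String) :
    pvFill (mk7 k p c o f g s) name rank "O" "Order" =
      mk7 k p c (if rank = "O" ∧ o = "" then name else o) f g s := by
  simp only [pvFill, getD_mk7_Order]; split_ifs <;> rfl
theorem pvFill_mk7_F (k p c o f g s name rank : String) :
    pvFill (mk7 k p c o f g s) name rank "F" "Family" =
      mk7 k p c o (if rank = "F" ∧ f = "" then name else f) g s := by
  simp only [pvFill, getD_mk7_Family]; split_ifs <;> rfl
theorem pvFill_mk7_G (k p c o f g s name rank : String) :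
    pvFill (mk7 k p c o f g s) name rank "G" "Genus" =
      mk7 k p c o f (if rank = "G" ∧ g = "" then name else g) s := by
  simp only [pvFill, getD_mk7_Genus]; split_ifs <;> rfl
theorem pvFill_mk7_S (k p c o f g s name rank : String) :
    pvFill (mk7 k p c o f g s) name rank "S" "Species" =
      mk7 k p c o f g (if rank = "S" ∧ s = "" then name else s) := by
  simp only [pvFill, getD_mk7_Species]; split_ifs <;> rfl

theorem stepA_mk7 (k p c o f g s : String) (x : String × String) :
    pvStepA (mk7 k p c o f g s) x =
      mk7 (if (x.2 = "R1" ∨ x.2 = "D" ∨ x.2 = "K") ∨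
              (x.1 = "Bacteria" ∨ x.1 = "Archaea" ∨ x.1 = "Eukaryota" ∨ x.1 = "Viruses") then
             if x.1 = "Bacteria" ∨ x.1 = "Archaea" ∨ x.1 = "Eukaryota" ∨ x.1 = "Viruses" then x.1
             else if x.2 = "R2" ∧ x.1 = "Eukaryota" then "Eukaryota"
             else if x.2 = "K" then (if k = "" then x.1 else k)
             else k
           else k)
          (if x.2 = "P" ∧ p = "" then x.1 else p)
          (if x.2 = "C" ∧ c = "" then x.1 else c)
          (if x.2 = "O" ∧ o = "" then x.1 else o)
          (if x.2 = "F" ∧ f = "" then x.1 else f)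
          (if x.2 = "G" ∧ g = "" then x.1 else g)
          (if x.2 = "S" ∧ s = "" then x.1 else s) := by
  simp only [pvStepA]
  rw [pvKing_mk7, pvFill_mk7_P, pvFill_mk7_C, pvFill_mk7_O, pvFill_mk7_F, pvFill_mk7_G, pvFill_mk7_S]

-- a named domain is never the empty string
theorem named_ne_empty (n : String)
    (h : n = "Bacteria" ∨ n = "Archaea" ∨ n = "Eukaryota" ∨ n = "Viruses") : n ≠ "" := by
  rcases h with h | h | h | h <;> subst h <;> decide

-- pvFindNamed distributes over append (its hits are never "")
theorem findNamed_append (a b : List (String × String)) :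
    pvFindNamed (a ++ b) = if pvFindNamed a ≠ "" then pvFindNamed a else pvFindNamed b := by
  induction a with
  | nil => simp [pvFindNamed]
  | cons x t ih =>
    by_cases h : x.1 = "Bacteria" ∨ x.1 = "Archaea" ∨ x.1 = "Eukaryota" ∨ x.1 = "Viruses"
    · simp [pvFindNamed, h, named_ne_empty x.1 h]
    · simp [pvFindNamed, h, ih]

-- B's reversed scan equals the left-to-right last-named characterization
theorem findNamed_reverse (l : List (String × String)) : pvFindNamed l.reverse = pvLN l := by
  induction l with
  | nil => rfl
  | cons x t ih =>
    simp only [List.reverse_cons, findNamed_append, ih, pvLN]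
    by_cases h : pvLN t ≠ "" <;> simp [h, pvFindNamed]

-- the six plain fields, one step
theorem field_step (x : String × String) (t : List (String × String)) (p r : String) :
    (if (if x.2 = r ∧ p = "" then x.1 else p) = "" then pvFirst t r
     else (if x.2 = r ∧ p = "" then x.1 else p))
      = if p = "" then pvFirst (x :: t) r else p := by
  simp only [pvFirst]
  split_ifs <;> simp_all

-- the Kingdom field, one step
theorem king_step (x : String × String) (t : List (String × String)) (k : String) :
    (let k' := if (x.2 = "R1" ∨ x.2 = "D" ∨ x.2 = "K") ∨
                  (x.1 = "Bacteria" ∨ x.1 = "Archaea" ∨ x.1 = "Eukaryota" ∨ x.1 = "Viruses") then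
                 if x.1 = "Bacteria" ∨ x.1 = "Archaea" ∨ x.1 = "Eukaryota" ∨ x.1 = "Viruses" then x.1
                 else if x.2 = "R2" ∧ x.1 = "Eukaryota" then "Eukaryota"
                 else if x.2 = "K" then (if k = "" then x.1 else k)
                 else k
               else k
     if pvLN t ≠ "" then pvLN t else if k' = "" then pvFirst t "K" else k')
      = if pvLN (x :: t) ≠ "" then pvLN (x :: t)
        else if k = "" then pvFirst (x :: t) "K" else k := by
  by_cases hL : pvLN t ≠ ""
  · simp only [pvLN, hL, ite_not]
    simp [hL]
  · push Not at hL
    by_cases hN : x.1 = "Bacteria" ∨ x.1 = "Archaea" ∨ x.1 = "Eukaryota" ∨ x.1 = "Viruses"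
    · simp [pvLN, hL, hN, named_ne_empty x.1 hN]
    · have hR2 : ¬ (x.2 = "R2" ∧ x.1 = "Eukaryota") := fun h => hN (Or.inr (Or.inr (Or.inl h.2)))
      simp only [pvLN, hL, hN, if_false, ite_not, pvFirst, hR2]
      by_cases hK : x.2 = "K"
      · by_cases hk : k = ""
        · by_cases hn : x.1 = "" <;> simp [hK, hk, hn]
        · simp [hK, hk]
      · have : ¬ (x.2 = "K" ∧ x.1 ≠ "") := fun h => hK h.1
        split_ifs <;> simp_all
-- characterization of A's fold from an arbitrary seven-field accumulator
theorem foldA_char (l : List (String × String)) (k p c o f g s : String) :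
    l.foldl pvStepA (mk7 k p c o f g s) =
      mk7 (if pvLN l ≠ "" then pvLN l else if k = "" then pvFirst l "K" else k)
          (if p = "" then pvFirst l "P" else p)
          (if c = "" then pvFirst l "C" else c)
          (if o = "" then pvFirst l "O" else o)
          (if f = "" then pvFirst l "F" else f)
          (if g = "" then pvFirst l "G" else g)
          (if s = "" then pvFirst l "S" else s) := by
  induction l generalizing k p c o f g s with
  | nil =>
    simp only [List.foldl_nil, pvLN, pvFirst, ne_eq]
    split_ifs <;> simp_all
  | cons x t ih =>
    simp only [List.foldl_cons, stepA_mk7, ih]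
    rw [show (let k' := if (x.2 = "R1" ∨ x.2 = "D" ∨ x.2 = "K") ∨
                  (x.1 = "Bacteria" ∨ x.1 = "Archaea" ∨ x.1 = "Eukaryota" ∨ x.1 = "Viruses") then
                 if x.1 = "Bacteria" ∨ x.1 = "Archaea" ∨ x.1 = "Eukaryota" ∨ x.1 = "Viruses" then x.1
                 else if x.2 = "R2" ∧ x.1 = "Eukaryota" then "Eukaryota"
                 else if x.2 = "K" then (if k = "" then x.1 else k)
                 else k
               else k
              if pvLN t ≠ "" then pvLN t else if k' = "" then pvFirst t "K" else k')
        = if pvLN (x :: t) ≠ "" then pvLN (x :: t)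
          else if k = "" then pvFirst (x :: t) "K" else k from king_step x t k]
    rw [field_step x t p "P", field_step x t c "C", field_step x t o "O",
        field_step x t f "F", field_step x t g "G", field_step x t s "S"]

theorem viruses_virus (s : String) (h : PySem.Str.isIn "Viruses" s = true) :
    PySem.Str.isIn "Virus" s = true := by
  rw [PySem.Str.isIn_iff_infix] at h ⊢
  exact List.IsInfix.trans (by decide) h

-- ===== VERDICT (by name: the statement is the Claim_ definition above) =====
theorem extract_taxonomy_from_lineage_spec : Claim_equal_extract_taxonomy_from_lineage := by
  intro l _
  unfold Spec_extract_taxonomy_from_lineage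
  show extract_taxonomy_from_lineage l = extract_taxonomy_from_lineage_alt l
  simp only [extract_taxonomy_from_lineage, extract_taxonomy_from_lineage_alt]
  rw [show (PySem.Dict.ofList [("Kingdom", ""), ("Phylum", ""), ("Class", ""), ("Order", ""),
        ("Family", ""), ("Genus", ""), ("Species", "")] : PySem.Dict String String)
      = mk7 "" "" "" "" "" "" "" from rfl]
  rw [foldA_char l "" "" "" "" "" "" "", findNamed_reverse]
  simp only [getD_mk7_Kingdom, insert_mk7_Kingdom, ite_not, if_true]
  by_cases hk : (if pvLN l = "" then pvFirst l "K" else pvLN l) = ""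
  · simp only [hk, if_true]
    simp only [pvFallback]
    by_cases hV : PySem.Str.isIn "Virus" (PySem.Str.join " -> " (l.map (·.1))) = true
    · split_ifs <;> simp_all [items_mk7]
    · have hVs : ¬ PySem.Str.isIn "Viruses" (PySem.Str.join " -> " (l.map (·.1))) = true :=
        fun h => hV (viruses_virus _ h)
      split_ifs <;> simp_all [items_mk7]
  · simp only [if_neg hk, items_mk7]
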